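-- pv_equiv track=rewrite | github.com/ArthB94/MasterBooks | main_copy.py | espaceApresPoint
-- ===== SOURCE A (Python) =====
-- def espaceApresPoint(text):
--     updated_text = ""
--     for i in range(len(text)):
--         if text[i] == "." and i < len(text) - 1 and text[i+1] != " ":
--             updated_text += ". "
--         else:
--             updated_text += text[i]
--     return updated_text
-- ===== SOURCE B (Python) =====
-- def espaceApresPoint(text):
--     parts = text.split('.')
--     pieces = [parts[0]]
--     for k, p in enumerate(parts[1:]):
--         if p[:1] == ' ' or (k == len(parts) - 2 and p == ''):
--             pieces.append('.')
--         else: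
--             pieces.append('. ')
--         pieces.append(p)
--     return ''.join(pieces)
-- ===== Notes on version B (the rewrite author's own statement) =====
-- stated objective: faster
-- what changed: Replaces the per-character index loop (with its in-range lookahead text[i+1] and quadratic string-concatenation accumulator) by split-then-rejoin: split the text on the period character, then re-join the segments, choosing per segment whether the separator carries the inserted space (no space when the segment starts with a space or is the empty segment after a trailing period), with one final join.
import Mathlib
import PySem

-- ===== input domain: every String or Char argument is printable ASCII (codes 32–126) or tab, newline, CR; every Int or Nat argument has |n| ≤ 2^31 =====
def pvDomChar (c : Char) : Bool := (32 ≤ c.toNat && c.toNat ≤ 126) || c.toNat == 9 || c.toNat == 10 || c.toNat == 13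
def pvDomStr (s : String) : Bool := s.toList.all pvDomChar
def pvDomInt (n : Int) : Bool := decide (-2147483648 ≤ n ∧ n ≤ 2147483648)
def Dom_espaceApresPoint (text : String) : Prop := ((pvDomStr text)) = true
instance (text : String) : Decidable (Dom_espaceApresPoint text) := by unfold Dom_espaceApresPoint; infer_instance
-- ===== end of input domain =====

-- B replaces A's per-character index loop (lookahead text[i+1], string-concatenation
-- accumulator) by split-on-'.' then re-join with a per-segment separator; same return value.

-- ===== PORT A =====
-- index loop over range(len(text)); text[i] is always in range here, ported as pyGetD
def espaceApresPoint (text : String) : String :=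
  String.mk ((PySem.List.pyRange 0 (text.toList.length) 1).foldl
    (fun acc i =>
      if PySem.List.pyGetD text.toList i ' ' = '.' ∧ i < (text.toList.length : Int) - 1 ∧
         PySem.List.pyGetD text.toList (i + 1) ' ' ≠ ' '
      then acc ++ ['.', ' ']
      else acc ++ [PySem.List.pyGetD text.toList i ' '])
    [])

-- ===== PORT B =====
-- parts = text.split('.'); loop over enumerate(parts[1:]) appending the separator
-- ('.' when the part starts with ' ', or is the empty last part) and then the part; ''.join
def espaceApresPoint_alt (text : String) : String :=
  let parts := PySem.Chars.splitOn text.toList ['.']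
  let pieces := (PySem.List.enumerate (parts.drop 1) 0).foldl
    (fun pieces kp =>
      (pieces ++ [if kp.2.take 1 = [' '] ∨ (kp.1 = (parts.length : Int) - 2 ∧ kp.2 = ([] : List Char))
                  then ['.'] else ['.', ' ']]) ++ [kp.2])
    [PySem.List.pyGetD parts 0 []]
  String.mk (PySem.Chars.join [] pieces)

-- ===== PRECONDITION & SPEC =====
def Spec_espaceApresPoint (text : String) (out : String) : Prop := out = espaceApresPoint_alt text
instance (text : String) (out : String) : Decidable (Spec_espaceApresPoint text out) := by unfold Spec_espaceApresPoint; infer_instance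

-- ===== CLAIM (what is proved, stated in full; the proofs are below) =====
def Claim_equal_espaceApresPoint : Prop := ∀ (text : String), Dom_espaceApresPoint text → Spec_espaceApresPoint text (espaceApresPoint text)

-- ===== LEMMAS AND PROOFS =====

-- whether the character after the current one forces the inserted space
def pvNext : List Char → Bool
  | [] => false
  | r :: _ => r ≠ ' '

-- A's result, as a structural recursion over the character list
def pvA : List Char → List Char
  | [] => []
  | c :: rest => (if c = '.' ∧ pvNext rest = true then ['.', ' '] else [c]) ++ pvA rest

-- split on '.', structurally (what PySem.Chars.splitOn computes for sep = ['.'])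
def pvSplit : List Char → List (List Char)
  | [] => [[]]
  | c :: rest =>
      if c = '.' then [] :: pvSplit rest
      else
        match pvSplit rest with
        | h :: t => (c :: h) :: t
        | [] => [[c]]

-- B's glue of the tail segments: separator '.' or '. ' then the segment
def pvGlue : List (List Char) → List Char
  | [] => []
  | [p] => (if p.take 1 = [' '] ∨ p = [] then ['.'] else ['.', ' ']) ++ p
  | p :: q :: t => (if p.take 1 = [' '] then ['.'] else ['.', ' ']) ++ p ++ pvGlue (q :: t)

theorem pvSplit_ne_nil (cs : List Char) : pvSplit cs ≠ [] := by
  cases cs with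
  | nil => simp [pvSplit]
  | cons c rest =>
      simp only [pvSplit]
      split_ifs
      · simp
      · cases h : pvSplit rest <;> simp

theorem pvGlue_cons (h : List Char) (t : List (List Char)) :
    pvGlue (h :: t)
      = (if h.take 1 = [' '] ∨ (h = [] ∧ t = []) then ['.'] else ['.', ' ']) ++ h ++ pvGlue t := by
  cases t with
  | nil => simp [pvGlue]
  | cons q ts => simp [pvGlue]

-- the head segment's shape decides A's space test for the character after a dot
theorem pvNext_split (rest : List Char) (h : List Char) (t : List (List Char))
    (hs : pvSplit rest = h :: t) :
    (pvNext rest = true) ↔ ¬ (h.take 1 = [' '] ∨ (h = [] ∧ t = [])) := by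
  cases rest with
  | nil =>
      simp only [pvSplit] at hs
      injection hs with h1 h2
      subst h1; subst h2
      simp [pvNext]
  | cons r rs =>
      by_cases hr : r = '.'
      · subst hr
        simp only [pvSplit, if_true] at hs
        injection hs with h1 h2
        subst h1; subst h2
        have hne := pvSplit_ne_nil rs
        simp [pvNext, hne]
      · simp only [pvSplit, if_neg hr] at hs
        cases hs2 : pvSplit rs with
        | nil => exact absurd hs2 (pvSplit_ne_nil rs)
        | cons h2 t2 =>
            rw [hs2] at hs
            injection hs with h1 h3
            subst h1; subst h3
            by_cases hsp : r = ' '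
            · simp [pvNext, hsp]
            · simp [pvNext, hsp]

-- A's loop from index pre.length, on the fixed full list pre ++ cs, equals acc ++ pvA cs
theorem pvLoop_eq (cs : List Char) : ∀ (pre acc : List Char),
    (PySem.List.pyRange (pre.length) ((pre ++ cs).length) 1).foldl
      (fun acc i =>
        if PySem.List.pyGetD (pre ++ cs) i ' ' = '.' ∧ i < ((pre ++ cs).length : Int) - 1 ∧
           PySem.List.pyGetD (pre ++ cs) (i + 1) ' ' ≠ ' '
        then acc ++ ['.', ' ']
        else acc ++ [PySem.List.pyGetD (pre ++ cs) i ' '])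
      acc
    = acc ++ pvA cs := by
  induction cs with
  | nil =>
      intro pre acc
      simp [PySem.List.pyRange_one_eq_nil, pvA]
  | cons c rest ih =>
      intro pre acc
      have hlen : ((pre ++ c :: rest).length : Int) = (pre.length : Int) + (rest.length + 1) := by
        simp
      rw [PySem.List.pyRange_one_cons (by omega : (pre.length : Int) < ((pre ++ c :: rest).length : Int))]
      rw [List.foldl_cons]
      have hget : PySem.List.pyGetD (pre ++ c :: rest) (pre.length : Int) ' ' = c := by
        simp [PySem.List.pyGetD_natCast, List.getD]
      cases rest with
      | nil =>
          have hcond : ¬ (PySem.List.pyGetD (pre ++ [c]) (pre.length : Int) ' ' = '.' ∧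
              (pre.length : Int) < ((pre ++ [c]).length : Int) - 1 ∧
              PySem.List.pyGetD (pre ++ [c]) ((pre.length : Int) + 1) ' ' ≠ ' ') := by
            simp
          rw [if_neg hcond]
          have : PySem.List.pyRange ((pre.length : Int) + 1) ((pre ++ [c]).length : Int) 1 = [] := by
            apply PySem.List.pyRange_one_eq_nil; simp
          rw [this, List.foldl_nil, hget]
          simp [pvA, pvNext]
      | cons r rs =>
          have hget2 : PySem.List.pyGetD (pre ++ c :: r :: rs) ((pre.length : Int) + 1) ' ' = r := by
            have h1 : ((pre.length : Int) + 1) = ((pre.length + 1 : Nat) : Int) := by push_cast; ring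
            rw [h1, PySem.List.pyGetD_natCast]
            rw [show pre ++ c :: r :: rs = (pre ++ [c]) ++ r :: rs by simp]
            rw [show pre.length + 1 = (pre ++ [c]).length by simp]
            simp [List.getD]
          have hlt : (pre.length : Int) < ((pre ++ c :: r :: rs).length : Int) - 1 := by
            simp; omega
          rw [hget, hget2]
          by_cases hc : c = '.' ∧ r ≠ ' '
          · rw [if_pos ⟨hc.1, hlt, hc.2⟩]
            rw [show ((pre.length : Int) + 1) = (((pre ++ [c]).length : Nat) : Int) by simp]
            rw [show pre ++ c :: r :: rs = (pre ++ [c]) ++ r :: rs by simp]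
            rw [ih (pre ++ [c]) (acc ++ ['.', ' '])]
            simp [pvA, pvNext, hc.1, hc.2]
          · rw [if_neg (by tauto)]
            rw [show ((pre.length : Int) + 1) = (((pre ++ [c]).length : Nat) : Int) by simp]
            rw [show pre ++ c :: r :: rs = (pre ++ [c]) ++ r :: rs by simp]
            rw [ih (pre ++ [c]) (acc ++ [c])]
            by_cases h1 : c = '.'
            · have h2 : r = ' ' := by tauto
              simp [pvA, pvNext, h1, h2]
            · simp [pvA, pvNext, h1]

-- PySem's fuelled splitOn.go, for sep = ['.'], computes pvSplit
theorem pvGo_eq : ∀ (fuel : Nat) (l cur : List Char) (acc : List (List Char)),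
    l.length < fuel →
    PySem.Chars.splitOn.go ['.'] fuel l cur acc
      = acc.reverse ++ ((cur.reverse ++ (pvSplit l).headI) :: (pvSplit l).tail) := by
  intro fuel
  induction fuel with
  | zero => intro l cur acc h; omega
  | succ n ih =>
      intro l cur acc h
      cases l with
      | nil => simp [PySem.Chars.splitOn.go, pvSplit]
      | cons c rest =>
          rw [PySem.Chars.splitOn.go]
          by_cases hc : c = '.'
          · have hpre : List.isPrefixOf ['.'] (c :: rest) = true := by
              simp [List.isPrefixOf, hc]
            rw [if_pos hpre]
            simp only [List.length_cons, List.length_nil, Nat.zero_add, List.drop_succ_cons,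
              List.drop_zero]
            rw [ih rest [] (cur.reverse :: acc) (by simp at h; omega)]
            cases hs : pvSplit rest with
            | nil => exact absurd hs (pvSplit_ne_nil rest)
            | cons a b => simp [pvSplit, hc, hs]
          · have hpre : ¬ List.isPrefixOf ['.'] (c :: rest) = true := by
              simp only [List.isPrefixOf, Bool.and_eq_true, beq_iff_eq, and_true]
              exact fun hx => hc hx.symm
            rw [if_neg hpre]
            rw [ih rest (c :: cur) acc (by simp at h; omega)]
            have hne := pvSplit_ne_nil rest
            cases hs : pvSplit rest with
            | nil => exact absurd hs hne
            | cons hd tl => simp [pvSplit, hc, hs]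

theorem pvSplitOn_eq (cs : List Char) : PySem.Chars.splitOn cs ['.'] = pvSplit cs := by
  rw [PySem.Chars.splitOn, pvGo_eq (cs.length + 1) cs [] [] (by omega)]
  have hne := pvSplit_ne_nil cs
  cases hs : pvSplit cs with
  | nil => exact absurd hs hne
  | cons h t => simp

-- the flattened per-pair pieces of B's loop over enumerate, starting at index m, glue the tail
theorem pvFold_glue (t : List (List Char)) : ∀ (m : Int),
    ((PySem.List.enumerate t m).flatMap
      (fun kp => [(if kp.2.take 1 = [' '] ∨ (kp.1 = m + (t.length : Int) - 1 ∧ kp.2 = ([] : List Char))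
                   then ['.'] else ['.', ' ']), kp.2])).flatten
    = pvGlue t := by
  induction t with
  | nil => intro m; simp [PySem.List.enumerate_nil, pvGlue]
  | cons p rest ih =>
      intro m
      rw [PySem.List.enumerate_cons, List.flatMap_cons, List.flatten_append]
      have hlen : ((p :: rest).length : Int) = (rest.length : Int) + 1 := by push_cast [List.length_cons]; ring
      have hrec : ((PySem.List.enumerate rest (m + 1)).flatMap
          (fun kp => [(if kp.2.take 1 = [' '] ∨ (kp.1 = m + ((p :: rest).length : Int) - 1 ∧ kp.2 = ([] : List Char))
                   then ['.'] else ['.', ' ']), kp.2])).flatten = pvGlue rest := by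
        rw [← ih (m + 1)]
        congr 1
        apply List.flatMap_congr
        intro kp _
        by_cases h1 : kp.2.take 1 = [' ']
        · simp [h1]
        · by_cases h2 : kp.2 = ([] : List Char)
          · simp [h2, show m + ((rest.length : Int) + 1) - 1 = m + 1 + (rest.length : Int) - 1 from by ring]
          · simp [h1, h2]
      rw [hrec, pvGlue_cons]
      by_cases hr : rest = []
      · subst hr
        by_cases hp : p.take 1 = [' '] <;> simp [hp]
      · have hm : ¬ (m = m + ((rest.length : Int) + 1) - 1) := by
          intro hx
          have hz : (rest.length : Int) = 0 := by omega
          exact hr (List.length_eq_zero_iff.mp (by exact_mod_cast hz))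
        by_cases hp : p.take 1 = [' '] <;> simp [hp, hm, hr]


-- ''.join on char-list pieces is flatten
theorem pvJoinNil (l : List (List Char)) : PySem.Chars.join [] l = l.flatten := by
  induction l with
  | nil => simp [PySem.Chars.join_nil]
  | cons p rest ih =>
      cases rest with
      | nil => simp [PySem.Chars.join_singleton]
      | cons q rs => rw [PySem.Chars.join_cons_cons]; simp [ih]

-- join with empty separator of B's pieces list = head ++ pvGlue tail
theorem pvFold_glue_join (h : List Char) (t : List (List Char)) :
    PySem.Chars.join [] (PySem.List.pyGetD (h :: t) 0 [] ::
      (PySem.List.enumerate t 0).flatMap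
        (fun kp => [(if kp.2.take 1 = [' '] ∨ (kp.1 = 0 + (t.length : Int) - 1 ∧ kp.2 = ([] : List Char))
                     then ['.'] else ['.', ' ']), kp.2]))
    = h ++ pvGlue t := by
  rw [pvJoinNil, List.flatten_cons, pvFold_glue t 0]
  simp [PySem.List.pyGetD]

-- main bridge: A's recursion equals head-of-split ++ glue-of-tail
theorem pvA_eq_split (cs : List Char) :
    pvA cs = (pvSplit cs).headI ++ pvGlue (pvSplit cs).tail := by
  induction cs with
  | nil => simp [pvA, pvSplit, pvGlue]
  | cons c rest ih =>
      have hne := pvSplit_ne_nil rest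
      cases hs : pvSplit rest with
      | nil => exact absurd hs hne
      | cons h t =>
          rw [hs] at ih
          simp only [List.headI, List.tail] at ih
          by_cases hc : c = '.'
          · subst hc
            rw [show pvSplit ('.' :: rest) = [] :: (h :: t) by simp [pvSplit, hs]]
            simp only [List.headI, List.tail, List.nil_append]
            rw [pvGlue_cons, pvA]
            have hnx := pvNext_split rest h t hs
            by_cases hb : h.take 1 = [' '] ∨ (h = [] ∧ t = [])
            · have : ¬ pvNext rest = true := fun hn => (hnx.mp hn) hb
              simp only [if_pos hb]
              simp [this, ih]
            · have : pvNext rest = true := hnx.mpr hb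
              simp [hb, this, ih]
          · simp only [pvSplit, if_neg hc, hs, List.headI, List.tail]
            have hnotdot : ¬ (c = '.' ∧ pvNext rest = true) := fun hx => hc hx.1
            simp [pvA, hnotdot, ih]

-- ===== VERDICT =====
theorem espaceApresPoint_spec : Claim_equal_espaceApresPoint := by
  intro text _
  unfold Spec_espaceApresPoint espaceApresPoint espaceApresPoint_alt
  have hA := pvLoop_eq text.toList [] []
  simp only [List.nil_append, List.length_nil, Nat.cast_zero] at hA
  rw [hA]
  rw [pvSplitOn_eq]
  have hne := pvSplit_ne_nil text.toList
  cases hs : pvSplit text.toList with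
  | nil => exact absurd hs hne
  | cons h t =>
      simp only [List.drop_one, List.tail_cons]
      rw [show (fun (pieces : List (List Char)) (kp : Int × List Char) =>
          (pieces ++ [if kp.2.take 1 = [' '] ∨ (kp.1 = (((h :: t).length : Nat) : Int) - 2 ∧ kp.2 = ([] : List Char))
                      then ['.'] else ['.', ' ']]) ++ [kp.2])
        = fun (pieces : List (List Char)) (kp : Int × List Char) =>
            pieces ++ [(if kp.2.take 1 = [' '] ∨ (kp.1 = (((h :: t).length : Nat) : Int) - 2 ∧ kp.2 = ([] : List Char))
                        then ['.'] else ['.', ' ']), kp.2] from by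
          funext pieces kp; simp]
      rw [PySem.List.foldl_append_eq_flatMap]
      simp only [show (((h :: t).length : Nat) : Int) - 2 = 0 + (t.length : Int) - 1 from by
        push_cast [List.length_cons]; ring]
      rw [List.singleton_append, pvFold_glue_join h t]
      rw [pvA_eq_split, hs]
      simp
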